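-- pv_equiv track=rewrite | github.com/MrBrantCode/unitest_baseline | mut_generate/mist_train_cf/cf_44426/solution.py | prime_factorial
-- ===== SOURCE A (Python) =====
-- def prime_factorial(nums):
--     def factorial(n):
--         if n == 0:
--             return 1
--         else:
--             return n * factorial(n-1)
--
--     def is_prime(n):
--         if n <= 1:
--             return False
--         elif n == 2:
--             return True
--         else:
--             for i in range(2, n):
--                 if (n % i) == 0:
--                     return False
--             return True
--
--     result = []
--     for n in nums:
--         if isinstance(n, int):
--             if is_prime(n):
--                 result.append(factorial(n))
--     return result
-- ===== SOURCE B (Python) =====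
-- def prime_factorial(nums):
--     def is_prime(n):
--         if n < 2:
--             return False
--         i = 2
--         while i * i <= n:
--             if n % i == 0:
--                 return False
--             i += 1
--         return True
--
--     def factorial(n):
--         r = 1
--         for k in range(2, n + 1):
--             r *= k
--         return r
--
--     return [factorial(n) for n in nums if is_prime(n)]
-- ===== Notes on version B (the rewrite author's own statement) =====
-- stated objective: alternative
-- what changed: is_prime does trial division only up to sqrt(n) instead of scanning all of range(2,n), the recursive factorial becomes an iterative product, and the result is built by a comprehension instead of an append loop; total runtime stays dominated by the big-integer factorials, so measured speed is similar.
import Mathlib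
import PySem

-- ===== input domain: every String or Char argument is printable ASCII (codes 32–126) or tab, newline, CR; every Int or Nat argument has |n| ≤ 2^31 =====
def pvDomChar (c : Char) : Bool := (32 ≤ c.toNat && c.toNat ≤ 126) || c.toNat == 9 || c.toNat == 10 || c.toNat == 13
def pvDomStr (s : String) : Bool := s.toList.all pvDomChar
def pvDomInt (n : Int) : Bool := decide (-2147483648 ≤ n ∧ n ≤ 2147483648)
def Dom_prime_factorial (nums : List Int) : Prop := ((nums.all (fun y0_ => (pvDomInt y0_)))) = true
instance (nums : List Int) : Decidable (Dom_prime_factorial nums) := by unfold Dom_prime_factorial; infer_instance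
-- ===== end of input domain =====

-- B replaces A's primality loop over range(2, n) with trial division up to √n and A's
-- recursive factorial with an iterative product (alternative algorithm, same observable values).

-- ===== PORT A =====

-- A's recursive 'factorial': 'if n == 0: return 1 else: return n * factorial(n-1)'.
-- A only calls it with n ≥ 2 (a prime), so structural recursion on the Nat value is exact there.
def pvFactA : Nat → Int
  | 0 => 1
  | k + 1 => ((k : Int) + 1) * pvFactA k

-- A's loop 'for i in range(2, n): if n % i == 0: return False / return True'; reached only
-- with n ≥ 3, where Nat arithmetic agrees with Python's.
def pvIsPrimeLoopA (m i : Nat) : Bool :=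
  if i < m then (if m % i == 0 then false else pvIsPrimeLoopA m (i + 1)) else true
termination_by m - i

def pvIsPrimeA (n : Int) : Bool :=
  if n ≤ 1 then false
  else if n = 2 then true
  else pvIsPrimeLoopA n.toNat 2

-- 'isinstance(n, int)' is identically true on List Int, so it is omitted in the port.
def prime_factorial (nums : List Int) : List Int :=
  nums.foldl (fun result n => if pvIsPrimeA n then result ++ [pvFactA n.toNat] else result) []

-- ===== PORT B =====

-- B's 'i = 2; while i*i <= n: if n % i == 0: return False; i += 1; return True' (reached with n ≥ 2).
def pvTrialB (m i : Nat) : Bool :=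
  if i * i ≤ m then (if m % i == 0 then false else pvTrialB m (i + 1)) else true
termination_by m + 1 - i
decreasing_by
  rename_i h _
  rcases Nat.eq_zero_or_pos i with rfl | hi
  · omega
  · have : i ≤ i * i := Nat.le_mul_of_pos_left i hi
    omega

def pvIsPrimeB (n : Int) : Bool :=
  if n < 2 then false else pvTrialB n.toNat 2

-- B's 'r = 1; for k in range(2, n + 1): r *= k; return r'.
def pvFactB (n : Int) : Int :=
  (PySem.List.pyRange 2 (n + 1) 1).foldl (fun r k => r * k) 1

def prime_factorial_alt (nums : List Int) : List Int :=
  (nums.filter pvIsPrimeB).map pvFactB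

-- ===== PRECONDITION & SPEC =====
def Spec_prime_factorial (nums : List Int) (out : List Int) : Prop := out = prime_factorial_alt nums
instance (nums : List Int) (out : List Int) : Decidable (Spec_prime_factorial nums out) := by unfold Spec_prime_factorial; infer_instance

-- ===== CLAIM (what is proved, stated in full; the proofs are below) =====
def Claim_equal_prime_factorial : Prop := ∀ (nums : List Int), Dom_prime_factorial nums → Spec_prime_factorial nums (prime_factorial nums)

-- ===== LEMMAS AND PROOFS =====

-- A's inner loop returns true iff no j in [i, m) divides m.
lemma pvIsPrimeLoopA_char (m : Nat) :
    ∀ k i, m ≤ i + k → (pvIsPrimeLoopA m i = true ↔ ∀ j, i ≤ j → j < m → m % j ≠ 0) := by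
  intro k
  induction k with
  | zero =>
    intro i h
    rw [pvIsPrimeLoopA]
    simp only [if_neg (by omega : ¬ i < m), true_iff]
    intro j hij hjm; omega
  | succ k ih =>
    intro i h
    rw [pvIsPrimeLoopA]
    by_cases hlt : i < m
    · rw [if_pos hlt]
      by_cases hz : m % i = 0
      · rw [if_pos (by simpa using hz)]
        simp only [Bool.false_eq_true, false_iff]
        exact fun hall => hall i le_rfl hlt hz
      · rw [if_neg (by simpa using hz), ih (i + 1) (by omega)]
        constructor
        · intro hall j hij hjm
          rcases Nat.eq_or_lt_of_le hij with rfl | hlt'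
          · exact hz
          · exact hall j hlt' hjm
        · intro hall j hij hjm
          exact hall j (by omega) hjm
    · rw [if_neg hlt]
      simp only [true_iff]
      intro j hij hjm; omega

-- B's trial-division loop returns true iff no j ≥ i with j² ≤ m divides m.
lemma pvTrialB_char (m : Nat) :
    ∀ k i, m + 1 ≤ i + k → (pvTrialB m i = true ↔ ∀ j, i ≤ j → j * j ≤ m → m % j ≠ 0) := by
  intro k
  induction k with
  | zero =>
    intro i h
    rw [pvTrialB]
    have hii : ¬ i * i ≤ m := by
      intro hle
      have hi : 1 ≤ i := by omega
      have : i ≤ i * i := Nat.le_mul_of_pos_left i hi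
      omega
    simp only [if_neg hii, true_iff]
    intro j hij hjm
    have : i ≤ i * i := Nat.le_mul_of_pos_left i (by omega)
    have : i ≤ j * j := le_trans (by omega) (Nat.mul_le_mul hij hij)
    omega
  | succ k ih =>
    intro i h
    rw [pvTrialB]
    by_cases hii : i * i ≤ m
    · rw [if_pos hii]
      by_cases hz : m % i = 0
      · rw [if_pos (by simpa using hz)]
        simp only [Bool.false_eq_true, false_iff]
        exact fun hall => hall i le_rfl hii hz
      · rw [if_neg (by simpa using hz), ih (i + 1) (by omega)]
        constructor
        · intro hall j hij hjm
          rcases Nat.eq_or_lt_of_le hij with rfl | hlt'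
          · exact hz
          · exact hall j hlt' hjm
        · intro hall j hij hjm
          exact hall j (by omega) hjm
    · rw [if_neg hii]
      simp only [true_iff]
      intro j hij hjm
      exact absurd (le_trans (Nat.mul_le_mul hij hij) hjm) hii

lemma pvIsPrimeLoopA_prime {m : Nat} (hm : 2 ≤ m) :
    pvIsPrimeLoopA m 2 = true ↔ m.Prime := by
  rw [pvIsPrimeLoopA_char m m 2 (by omega), Nat.prime_def_lt']
  constructor
  · intro h
    refine ⟨hm, fun j hj hjm hdvd => h j hj hjm ?_⟩
    exact Nat.dvd_iff_mod_eq_zero.mp hdvd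
  · rintro ⟨-, h⟩ j hj hjm hz
    exact h j hj hjm (Nat.dvd_iff_mod_eq_zero.mpr hz)

lemma pvTrialB_prime {m : Nat} (hm : 2 ≤ m) :
    pvTrialB m 2 = true ↔ m.Prime := by
  rw [pvTrialB_char m (m + 1) 2 (by omega), Nat.prime_def_le_sqrt]
  constructor
  · intro h
    refine ⟨hm, fun j hj hjs hdvd => h j hj (Nat.le_sqrt.mp hjs) ?_⟩
    exact Nat.dvd_iff_mod_eq_zero.mp hdvd
  · rintro ⟨-, h⟩ j hj hjm hz
    exact h j hj (Nat.le_sqrt.mpr hjm) (Nat.dvd_iff_mod_eq_zero.mpr hz)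

-- The two primality tests agree on every integer.
lemma isPrime_eq (n : Int) : pvIsPrimeA n = pvIsPrimeB n := by
  unfold pvIsPrimeA pvIsPrimeB
  by_cases h1 : n ≤ 1
  · rw [if_pos h1, if_pos (by omega)]
  · rw [if_neg h1, if_neg (by omega : ¬ n < 2)]
    by_cases h2 : n = 2
    · subst h2
      rw [if_pos rfl, pvTrialB]
      norm_num
    · rw [if_neg h2]
      have hm : 2 ≤ n.toNat := by omega
      rw [Bool.eq_iff_iff, pvIsPrimeLoopA_prime hm, pvTrialB_prime hm]

-- B's product over range(2, m+1) equals A's recursive factorial.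
lemma pvFactB_cast : ∀ m : Nat,
    (PySem.List.pyRange 2 ((m : Int) + 1) 1).foldl (fun r k => r * k) 1 = pvFactA m := by
  intro m
  induction m with
  | zero => decide
  | succ m ih =>
    rcases m with _ | m'
    · decide
    · have hb : (2 : Int) ≤ ((m' + 1 : Nat) : Int) + 1 := by push_cast; omega
      have hre : ((m' + 1 + 1 : Nat) : Int) + 1 = (((m' + 1 : Nat) : Int) + 1) + 1 := by push_cast; ring
      rw [hre, PySem.List.pyRange_one_succ_right hb, List.foldl_append]
      simp only [List.foldl_cons, List.foldl_nil]
      rw [ih]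
      conv_rhs => rw [pvFactA]
      exact mul_comm _ _

lemma pvFactB_eq {n : Int} (hn : 0 ≤ n) : pvFactB n = pvFactA n.toNat := by
  unfold pvFactB
  have : ((n.toNat : Int)) = n := Int.toNat_of_nonneg hn
  rw [← this]
  exact pvFactB_cast n.toNat

lemma pvIsPrimeB_two_le {n : Int} (h : pvIsPrimeB n = true) : 2 ≤ n := by
  unfold pvIsPrimeB at h
  by_contra hlt
  rw [if_pos (by omega)] at h
  exact Bool.false_ne_true h

-- ===== VERDICT (by name: the statement is the Claim_ definition above) =====
theorem prime_factorial_spec : Claim_equal_prime_factorial := by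
  intro nums _
  unfold Spec_prime_factorial prime_factorial prime_factorial_alt
  rw [PySem.List.foldl_append_if pvIsPrimeA (fun n => pvFactA n.toNat) nums []]
  rw [List.filter_congr (fun x _ => isPrime_eq x)]
  simp only [List.nil_append]
  refine List.map_congr_left ?_
  intro x hx
  have hpb : pvIsPrimeB x = true := (List.mem_filter.mp hx).2
  exact (pvFactB_eq (by have := pvIsPrimeB_two_le hpb; omega)).symm
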